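-- pv_equiv track=rewrite | github.com/yacoublambaz/EECE230PssSpring2022 | mar29th.py | maxLenOfLShape
-- ===== SOURCE A (Python) =====
-- def maxLenOfLShape(M):
--     def traverse(M,i,j,isRight):
--         #isRight indicates if this branch walks right or no.
--         #If the branch walks right, you shouldn't go down after.
--         rows = len(M)
--         cols = len(M[0])
--         #If the branch violates any of the conditions:
--         #1. If M[i][j] is not a zero
--         #2. If i is out of bounds
--         #3. If j is out of bounds
--         #return 0 signalling the end of this branch
--         if i >= rows or j >= cols or M[i][j] == 0:
--             return 0
--         down = 0 #to eliminate Variable Not Defined errors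
--         if not isRight: #If this branch is not a right branch
--             down = traverse(M,i+1,j, False) #traverse downwards
--         right = traverse(M,i,j+1,True) #traverse rightwards anyway whenever possible
--         return 1 + max(down,right)
--
--     currMax = 0
--     for i in range(len(M)):
--         for j in range(len(M[0])):
--             #what if we had multiple L's, I need the longer one
--             if M[i][j] == 1:
--                 trav = traverse(M,i,j, False)
--                 currMax = max(currMax,  trav)
--     return currMax
-- ===== SOURCE B (Python) =====
-- def maxLenOfLShape(M):
--     if not M:
--         return 0
--     rows, cols = len(M), len(M[0])
--     below = [0] * cols  # D-values of the row beneath the current one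
--     best = 0
--     for i in range(rows - 1, -1, -1):
--         row = M[i]
--         # R[j] = length of the horizontal run of nonzeros starting at (i, j)
--         R = [0] * (cols + 1)
--         for j in range(cols - 1, -1, -1):
--             R[j] = 0 if row[j] == 0 else 1 + R[j + 1]
--         # D[j] = longest down-then-right path starting at (i, j)
--         D = [0 if row[j] == 0 else 1 + max(below[j], R[j + 1]) for j in range(cols)]
--         for j in range(cols):
--             if row[j] == 1 and D[j] > best:
--                 best = D[j]
--         below = D
--     return best
-- ===== Notes on version B (the rewrite author's own statement) =====
-- stated objective: alternative
-- what changed: Replaced the per-start-cell recursive branch walk with a bottom-up dynamic program that keeps one row of down-values and one row of horizontal run lengths; worst-case cost drops to O(rows*cols), though on sparse grids (where A's recursion exits immediately) the measured times are comparable.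
import Mathlib
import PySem

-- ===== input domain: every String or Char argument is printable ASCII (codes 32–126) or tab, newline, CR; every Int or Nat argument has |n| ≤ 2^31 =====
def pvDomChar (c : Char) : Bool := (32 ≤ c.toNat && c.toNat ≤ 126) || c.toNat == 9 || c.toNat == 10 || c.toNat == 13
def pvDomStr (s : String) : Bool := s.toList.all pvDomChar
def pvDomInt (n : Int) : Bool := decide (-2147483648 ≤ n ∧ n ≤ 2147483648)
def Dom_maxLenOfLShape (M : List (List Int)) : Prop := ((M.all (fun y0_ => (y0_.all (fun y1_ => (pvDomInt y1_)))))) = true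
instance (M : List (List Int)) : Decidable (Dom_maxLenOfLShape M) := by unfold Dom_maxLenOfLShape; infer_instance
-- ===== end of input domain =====

-- B replaces A's per-start-cell recursive branch walk with a bottom-up row DP (alternative algorithm).

-- ===== PORT A =====
-- traverse(M,i,j,isRight): A's recursive branch walk (rows = len(M), cols = len(M[0]) passed along)
def travA (M : List (List Int)) (rows cols i j : Nat) (isRight : Bool) : Int :=
  if i ≥ rows ∨ j ≥ cols then 0
  else if (M.getD i []).getD j 0 == 0 then 0
  else
    let down := if !isRight then travA M rows cols (i+1) j false else 0
    let right := travA M rows cols i (j+1) true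
    1 + max down right
termination_by (rows - i) + (cols - j)
decreasing_by all_goals omega

def maxLenOfLShape (M : List (List Int)) : Int :=
  let rows := M.length
  let cols := (M.getD 0 []).length
  (List.range rows).foldl (fun currMax i =>
    (List.range cols).foldl (fun currMax j =>
      if (M.getD i []).getD j 0 == 1 then max currMax (travA M rows cols i j false)
      else currMax) currMax) 0

-- ===== PORT B =====
-- the descending j-loop of Source B filling R: returns [R[j], R[j+1], ..., R[cols]]
def runsFrom (row : List Int) (cols j : Nat) : List Int :=
  if _h : j ≥ cols then [0]
  else
    let rest := runsFrom row cols (j+1)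
    (if row.getD j 0 == 0 then 0 else 1 + rest.headD 0) :: rest
termination_by cols - j

-- one iteration of Source B's descending i-loop: state = (below, best)
def stepRow (cols : Nat) (st : List Int × Int) (row : List Int) : List Int × Int :=
  let R := runsFrom row cols 0
  let D := (List.range cols).map (fun j =>
    if row.getD j 0 == 0 then 0 else 1 + max (st.1.getD j 0) (R.getD (j+1) 0))
  let best := (List.range cols).foldl (fun best j =>
    if row.getD j 0 == 1 ∧ D.getD j 0 > best then D.getD j 0 else best) st.2
  (D, best)

def maxLenOfLShape_alt (M : List (List Int)) : Int :=
  if M = [] then 0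
  else
    let cols := (M.getD 0 []).length
    (M.reverse.foldl (stepRow cols) (List.replicate cols 0, 0)).2

-- ===== PRECONDITION & SPEC =====
-- Pre_ excludes exactly the inputs on which Python A raises IndexError: nonempty matrices with
-- some row shorter than the first row (A reads M[i][j] for every j < len(M[0])).
-- It excludes no input on which A returns.
def Pre_maxLenOfLShape (M : List (List Int)) : Prop :=
  ∀ row ∈ M, (M.getD 0 []).length ≤ row.length
instance (M : List (List Int)) : Decidable (Pre_maxLenOfLShape M) := by
  unfold Pre_maxLenOfLShape; infer_instance
def pvWitness_maxLenOfLShape : List (List Int) := [[1, 1, 0], [1, 0, 1], [1, 1, 1]]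

def Spec_maxLenOfLShape (M : List (List Int)) (out : Int) : Prop := out = maxLenOfLShape_alt M
instance (M : List (List Int)) (out : Int) : Decidable (Spec_maxLenOfLShape M out) := by unfold Spec_maxLenOfLShape; infer_instance

-- ===== CLAIM (what is proved, stated in full; the proofs are below) =====
def Claim_equal_maxLenOfLShape : Prop := ∀ (M : List (List Int)), Dom_maxLenOfLShape M → Pre_maxLenOfLShape M → Spec_maxLenOfLShape M (maxLenOfLShape M)

-- ===== LEMMAS AND PROOFS =====

def Rval (row : List Int) (cols j : Nat) : Int :=
  if j ≥ cols then 0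
  else if row.getD j 0 == 0 then 0
  else 1 + Rval row cols (j+1)
termination_by cols - j

def Dval (M : List (List Int)) (rows cols i j : Nat) : Int :=
  if i ≥ rows ∨ j ≥ cols then 0
  else if (M.getD i []).getD j 0 == 0 then 0
  else 1 + max (Dval M rows cols (i+1) j) (Rval (M.getD i []) cols (j+1))
termination_by rows - i
decreasing_by omega

lemma Rval_nonneg (row : List Int) (cols : Nat) : ∀ j, 0 ≤ Rval row cols j := by
  have H : ∀ n j, cols - j ≤ n → 0 ≤ Rval row cols j := by
    intro n
    induction n with
    | zero => intro j hj; rw [Rval]; simp only [ge_iff_le, show cols ≤ j by omega, if_pos]; omega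
    | succ n ih =>
      intro j hj
      rw [Rval]
      by_cases h1 : j ≥ cols
      · simp [h1]
      · have := ih (j+1) (by omega)
        simp only [h1, if_false]
        split <;> omega
  intro j; exact H (cols - j) j le_rfl



lemma travA_true (M : List (List Int)) (rows cols i : Nat) (hi : i < rows) (j : Nat) :
    travA M rows cols i j true = Rval (M.getD i []) cols j := by
  have H : ∀ n j, cols - j ≤ n → travA M rows cols i j true = Rval (M.getD i []) cols j := by
    intro n
    induction n with
    | zero =>
      intro j hj
      rw [travA, Rval]
      rw [if_pos (show i ≥ rows ∨ j ≥ cols from Or.inr (by omega)), if_pos (show j ≥ cols by omega)]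
    | succ n ih =>
      intro j hj
      by_cases h1 : j ≥ cols
      · rw [travA, Rval, if_pos (Or.inr h1), if_pos h1]
      · rw [travA, Rval]
        simp only [beq_iff_eq, if_neg (show ¬(i ≥ rows ∨ j ≥ cols) by omega), if_neg h1,
          Bool.not_true, Bool.false_eq_true, if_false]
        by_cases h2 : (M.getD i []).getD j 0 = 0
        · simp only [if_pos h2]
        · simp only [if_neg h2]
          rw [ih (j+1) (by omega), max_eq_right (Rval_nonneg (M.getD i []) cols (j+1))]
  exact H (cols - j) j le_rfl

lemma travA_false (M : List (List Int)) (rows cols : Nat) :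
    ∀ i j, travA M rows cols i j false = Dval M rows cols i j := by
  have H : ∀ n i j, rows - i ≤ n → travA M rows cols i j false = Dval M rows cols i j := by
    intro n
    induction n with
    | zero =>
      intro i j hi
      rw [travA, Dval, if_pos (show i ≥ rows ∨ j ≥ cols from Or.inl (by omega)),
        if_pos (show i ≥ rows ∨ j ≥ cols from Or.inl (by omega))]
    | succ n ih =>
      intro i j hi
      by_cases h0 : i ≥ rows ∨ j ≥ cols
      · rw [travA, Dval, if_pos h0, if_pos h0]
      · rw [travA, Dval]
        simp only [beq_iff_eq, if_neg h0, Bool.not_false, if_true]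
        by_cases h2 : (M.getD i []).getD j 0 = 0
        · simp only [if_pos h2]
        · simp only [if_neg h2]
          rw [ih (i+1) j (by omega), travA_true M rows cols i (by omega) (j+1)]
  intro i j; exact H (rows - i) i j le_rfl

lemma runsFrom_getD (row : List Int) (cols : Nat) :
    ∀ n j k, cols - j ≤ n → j + k ≤ cols → (runsFrom row cols j).getD k 0 = Rval row cols (j + k) := by
  intro n
  induction n with
  | zero =>
    intro j k hn hk
    have hj : j = cols := by omega
    have hk0 : k = 0 := by omega
    subst hj hk0
    rw [runsFrom, dif_pos (by omega), Rval, if_pos (by omega)]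
    rfl
  | succ n ih =>
    intro j k hn hk
    by_cases h1 : j ≥ cols
    · have hk0 : k = 0 := by omega
      subst hk0
      rw [runsFrom, dif_pos h1, Rval, if_pos (by omega)]
      rfl
    · rw [runsFrom, dif_neg h1]
      cases k with
      | zero =>
        show (if row.getD j 0 == 0 then 0 else 1 + (runsFrom row cols (j+1)).headD 0) = Rval row cols (j+0)
        have hh : (runsFrom row cols (j+1)).headD 0 = (runsFrom row cols (j+1)).getD 0 0 := by
          cases runsFrom row cols (j+1) <;> rfl
        rw [hh, ih (j+1) 0 (by omega) (by omega)]
        simp only [Nat.add_zero]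
        conv_rhs => rw [Rval]
        simp only [beq_iff_eq, if_neg h1]
      | succ k =>
        show (runsFrom row cols (j+1)).getD k 0 = Rval row cols (j + (k+1))
        rw [ih (j+1) k (by omega) (by omega)]
        congr 1
        omega

def DvalL (cols : Nat) : List (List Int) → Nat → Int
  | [], _ => 0
  | row :: rest, j =>
    if j ≥ cols then 0
    else if row.getD j 0 == 0 then 0
    else 1 + max (DvalL cols rest j) (Rval row cols (j+1))

def bestL (cols : Nat) : List (List Int) → Int
  | [] => 0
  | row :: rest =>
    (List.range cols).foldl (fun best j =>
      if row.getD j 0 == 1 ∧ DvalL cols (row :: rest) j > best then DvalL cols (row :: rest) j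
      else best) (bestL cols rest)

lemma Dval_eq_DvalL (M : List (List Int)) (cols : Nat) :
    ∀ i j, Dval M M.length cols i j = DvalL cols (M.drop i) j := by
  have H : ∀ n i j, M.length - i ≤ n → Dval M M.length cols i j = DvalL cols (M.drop i) j := by
    intro n
    induction n with
    | zero =>
      intro i j hn
      rw [List.drop_eq_nil_of_le (by omega), Dval, if_pos (Or.inl (by omega))]
      rfl
    | succ n ih =>
      intro i j hn
      by_cases hi : i < M.length
      · rw [List.drop_eq_getElem_cons hi, Dval]
        have hget : M.getD i [] = M[i] := List.getD_eq_getElem M [] hi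
        show _ = DvalL cols (M[i] :: M.drop (i+1)) j
        rw [DvalL]
        by_cases h1 : j ≥ cols
        · rw [if_pos (Or.inr h1), if_pos h1]
        · rw [if_neg (by omega), if_neg h1, hget, ih (i+1) j (by omega)]
      · rw [List.drop_eq_nil_of_le (by omega), Dval, if_pos (Or.inl (by omega))]
        rfl
  intro i j; exact H (M.length - i) i j le_rfl

def mkD (cols : Nat) (row : List Int) (X : List Int) : List Int :=
  (List.range cols).map (fun j =>
    if row.getD j 0 == 0 then 0 else 1 + max (X.getD j 0) ((runsFrom row cols 0).getD (j+1) 0))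

def mkBest (cols : Nat) (row : List Int) (X : List Int) (y : Int) : Int :=
  (List.range cols).foldl (fun best j =>
    if row.getD j 0 == 1 ∧ (mkD cols row X).getD j 0 > best then (mkD cols row X).getD j 0
    else best) y

lemma stepRow_eq (cols : Nat) (row : List Int) (X : List Int) (y : Int) :
    stepRow cols (X, y) row = (mkD cols row X, mkBest cols row X y) := rfl

lemma mkD_eq (cols : Nat) (row : List Int) (rest : List (List Int)) :
    mkD cols row ((List.range cols).map (fun j => DvalL cols rest j))
      = (List.range cols).map (fun j => DvalL cols (row :: rest) j) := by
  unfold mkD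
  apply List.map_congr_left
  intro j hj
  have hjc : j < cols := List.mem_range.mp hj
  rw [PySem.List.getD_map_range _ _ _ _ hjc,
    runsFrom_getD row cols cols 0 (j+1) (by omega) (by omega)]
  have hR : DvalL cols (row :: rest) j
      = if row.getD j 0 == 0 then 0 else 1 + max (DvalL cols rest j) (Rval row cols (j+1)) := by
    rw [DvalL, if_neg (show ¬ j ≥ cols by omega)]
  rw [hR]
  simp only [Nat.zero_add]

lemma foldr_stepRow (cols : Nat) :
    ∀ L : List (List Int),
      L.foldr (fun row st => stepRow cols st row) (List.replicate cols 0, 0)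
        = ((List.range cols).map (fun j => DvalL cols L j), bestL cols L) := by
  intro L
  induction L with
  | nil =>
    rw [List.foldr_nil, bestL]
    refine Prod.ext ?_ rfl
    show List.replicate cols 0 = _
    rw [show (fun j => DvalL cols [] j) = (fun _ => (0:Int)) from rfl, List.map_const', List.length_range]
  | cons row rest ih =>
    rw [List.foldr_cons, ih, stepRow_eq, mkBest, mkD_eq]
    refine Prod.ext rfl ?_
    show (List.range cols).foldl _ (bestL cols rest) = bestL cols (row :: rest)
    rw [bestL]
    apply PySem.List.foldl_congr_mem
    intro acc j hj
    have hjc : j < cols := List.mem_range.mp hj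
    rw [PySem.List.getD_map_range _ _ _ _ hjc]

def Gstep (M : List (List Int)) (rows cols : Nat) (acc : Int) (p : Nat × Nat) : Int :=
  if (M.getD p.1 []).getD p.2 0 == 1 then max acc (Dval M rows cols p.1 p.2) else acc

def cand (cols i : Nat) : List (Nat × Nat) := (List.range cols).map (fun j => (i, j))

lemma bestL_eq_fold (M : List (List Int)) (cols : Nat) :
    ∀ n i, M.length - i ≤ n →
      bestL cols (M.drop i)
        = ((List.range' i (M.length - i)).reverse.flatMap (cand cols)).foldl
            (Gstep M M.length cols) 0 := by
  intro n
  induction n with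
  | zero =>
    intro i hn
    rw [List.drop_eq_nil_of_le (by omega), show M.length - i = 0 by omega]
    rfl
  | succ n ih =>
    intro i hn
    by_cases hi : i < M.length
    · have hlen : M.length - i = (M.length - (i+1)) + 1 := by omega
      rw [List.drop_eq_getElem_cons hi, bestL, hlen, List.range'_succ, List.reverse_cons,
        List.flatMap_append, List.foldl_append, ← ih (i+1) (by omega)]
      have hcand : (List.flatMap (cand cols) [i]).foldl (Gstep M M.length cols)
          (bestL cols (M.drop (i+1)))
          = (List.range cols).foldl (fun acc j => Gstep M M.length cols acc (i, j))
            (bestL cols (M.drop (i+1))) := by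
        rw [show List.flatMap (cand cols) [i] = cand cols i by simp [cand], cand, List.foldl_map]
      rw [hcand]
      apply PySem.List.foldl_congr_mem
      intro acc j hj
      have hjc : j < cols := List.mem_range.mp hj
      unfold Gstep
      dsimp only
      have hget : M.getD i [] = M[i] := List.getD_eq_getElem M [] hi
      have hDv : DvalL cols (M[i] :: M.drop (i+1)) j = Dval M M.length cols i j := by
        rw [Dval_eq_DvalL M cols i j, List.drop_eq_getElem_cons hi]
      rw [hDv, hget]
      by_cases hc : M[i].getD j 0 = 1
      · rw [if_pos (beq_iff_eq.mpr hc)]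
        by_cases hlt : Dval M M.length cols i j > acc
        · rw [if_pos ⟨beq_iff_eq.mpr hc, hlt⟩, max_eq_right (by omega)]
        · rw [if_neg (fun h => hlt h.2), max_eq_left (by omega)]
      · rw [if_neg (fun h => hc (beq_iff_eq.mp h.1)), if_neg (fun h => hc (beq_iff_eq.mp h))]
    · rw [List.drop_eq_nil_of_le (by omega), show M.length - i = 0 by omega]
      rfl

lemma A_eq_fold (M : List (List Int)) :
    maxLenOfLShape M
      = ((List.range M.length).flatMap (cand (M.getD 0 []).length)).foldl
          (Gstep M M.length (M.getD 0 []).length) 0 := by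
  unfold maxLenOfLShape
  rw [List.foldl_flatMap]
  apply PySem.List.foldl_congr_mem
  intro acc i _
  rw [cand, List.foldl_map]
  apply PySem.List.foldl_congr_mem
  intro acc2 j _
  rw [travA_false, Gstep]

-- ===== VERDICT (by name: the statement is the Claim_ definition above) =====
theorem maxLenOfLShape_spec : Claim_equal_maxLenOfLShape := by
  intro M _hDom _hPre
  unfold Spec_maxLenOfLShape
  by_cases hM : M = []
  · subst hM; decide
  have hAlt : maxLenOfLShape_alt M = bestL (M.getD 0 []).length M := by
    simp only [maxLenOfLShape_alt, if_neg hM]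
    rw [List.foldl_reverse, foldr_stepRow]
  rw [hAlt, A_eq_fold]
  have hB : bestL (M.getD 0 []).length M
      = ((List.range M.length).reverse.flatMap (cand (M.getD 0 []).length)).foldl
          (Gstep M M.length (M.getD 0 []).length) 0 := by
    have := bestL_eq_fold M (M.getD 0 []).length M.length 0 (by omega)
    rw [List.drop_zero, Nat.sub_zero, ← List.range_eq_range'] at this
    exact this
  rw [hB]
  apply List.Perm.foldl_eq'
  · exact List.Perm.flatMap ((List.reverse_perm _).symm) (fun a _ => List.Perm.refl _)
  · intro x _ y _ z
    unfold Gstep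
    split_ifs <;> omega
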